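-- pv_equiv track=rewrite | github.com/deepspacepirate/googlefoobar | L2-already_did_that.py | zCalc
-- ===== SOURCE A (Python) =====
-- def zCalc(n, b):
-- 	# get x and y
-- 	k = len(n)
-- 	y = sorted([int(i) for i in n])
-- 	x = y[::-1]
--
-- 	# base subtraction
-- 	z = [x[i] - y[i] for i in range(k)]
-- 	for i in reversed(range(k)):
-- 		if (z[i] < 0):
-- 			z[i] += b
-- 			z[i-1] -= 1
--
-- 		elif (z[i] >= b):
-- 			z[i] -= b
-- 			z[i-1] += 1
--
-- 	return ''.join(map(str, z))
-- ===== SOURCE B (Python) =====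
-- def zCalc(n, b):
--     # Horner-evaluate descending and ascending digit arrangements, subtract,
--     # then re-expand the difference into exactly len(n) base-b digits.
--     digits = sorted(int(c) for c in n)
--     x = 0
--     for d in reversed(digits):
--         x = x * b + d
--     y = 0
--     for d in digits:
--         y = y * b + d
--     diff = x - y
--     out = []
--     for _ in range(len(n)):
--         diff, r = divmod(diff, b)
--         out.append(r)
--     return ''.join(str(d) for d in reversed(out))
-- ===== Notes on version B (the rewrite author's own statement) =====
-- stated objective: alternative
-- what changed: Replaces A's digit-wise one-pass borrow subtraction over an index-mutated list by Horner evaluation of the descending and ascending digit arrangements, an integer subtraction, and a base-b divmod re-expansion into exactly len(n) digits.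
-- outside the precondition, e.g. on zCalc('90', 2): A returns '6-6', B returns '01'; on zCalc('1', 0): A returns '1', B raises ZeroDivisionError
import Mathlib
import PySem

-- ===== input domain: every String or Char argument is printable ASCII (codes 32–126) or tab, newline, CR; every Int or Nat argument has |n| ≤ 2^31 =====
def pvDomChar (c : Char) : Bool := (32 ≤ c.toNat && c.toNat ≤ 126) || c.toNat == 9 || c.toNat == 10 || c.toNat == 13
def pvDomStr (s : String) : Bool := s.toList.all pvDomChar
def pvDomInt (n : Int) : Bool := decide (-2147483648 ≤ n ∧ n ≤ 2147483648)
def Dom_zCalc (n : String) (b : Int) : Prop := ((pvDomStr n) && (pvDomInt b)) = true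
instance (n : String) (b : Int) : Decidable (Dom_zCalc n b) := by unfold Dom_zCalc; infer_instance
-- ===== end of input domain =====

-- B replaces A's digit-wise borrow pass by Horner evaluation of the two digit arrangements
-- and a base-b re-expansion of their difference (objective: alternative; equal values on Pre_).

-- ===== PORT A =====
-- one iteration of A's borrow loop; Python's z[i-1] at i = 0 is z[k-1] (negative-index
-- wraparound), written out by hand here — exact whenever the loop body runs (k ≥ 1)
def zStep (b : Int) (k : Nat) (z : List Int) (i : Nat) : List Int :=
  let zi := z.getD i 0
  if zi < 0 then
    let z' := z.set i (zi + b)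
    let j := if i = 0 then k - 1 else i - 1
    z'.set j (z'.getD j 0 - 1)
  else if b ≤ zi then
    let z' := z.set i (zi - b)
    let j := if i = 0 then k - 1 else i - 1
    z'.set j (z'.getD j 0 + 1)
  else z

def zCalc (n : String) (b : Int) : String :=
  let k := n.toList.length
  let y := PySem.List.sorted (n.toList.map (fun c => (PySem.Int.ofChars? [c]).getD 0)) (fun v => v) false
  let x := (PySem.List.slice? y none none (-1)).getD []
  let z0 := (List.range k).map (fun i => x.getD i 0 - y.getD i 0)
  let z := ((List.range k).reverse).foldl (fun z i => zStep b k z i) z0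
  PySem.Str.join "" (z.map PySem.Int.toStr)

-- ===== PORT B =====
def zCalc_alt (n : String) (b : Int) : String :=
  let digits := PySem.List.sorted (n.toList.map (fun c => (PySem.Int.ofChars? [c]).getD 0)) (fun v => v) false
  let x := digits.reverse.foldl (fun a d => a * b + d) 0
  let y := digits.foldl (fun a d => a * b + d) 0
  let st := (List.range n.toList.length).foldl
      (fun (st : Int × List Int) _ =>
        let dr := (PySem.Int.divmod? st.1 b).getD (0, 0)
        (dr.1, st.2 ++ [dr.2])) (x - y, [])
  PySem.Str.join "" (st.2.reverse.map PySem.Int.toStr)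

-- ===== PRECONDITION & SPEC =====
-- Pre_ keeps the function's natural domain: every character a decimal digit whose value is
-- below the base b.  Excluded inputs on which A still returns a value: digit strings with a
-- digit ≥ b or b ≤ 0, where A's one-pass fix-up is not base-b arithmetic and its result
-- (including a wraparound write to z[-1]) is an accident of the implementation; strings with
-- a non-digit character make A raise ValueError.
def Pre_zCalc (n : String) (b : Int) : Prop :=
  n.toList.all (fun c => decide ('0' ≤ c) && decide (c ≤ '9') && decide ((c.toNat : Int) - 48 < b)) = true
instance (n : String) (b : Int) : Decidable (Pre_zCalc n b) := by unfold Pre_zCalc; infer_instance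
def pvWitness_zCalc : String × Int := ("902", 10)

def Spec_zCalc (n : String) (b : Int) (out : String) : Prop := out = zCalc_alt n b
instance (n : String) (b : Int) (out : String) : Decidable (Spec_zCalc n b out) := by unfold Spec_zCalc; infer_instance

-- ===== CLAIM (what is proved, stated in full; the proofs are below) =====
def Claim_equal_zCalc : Prop := ∀ (n : String) (b : Int), Dom_zCalc n b → Pre_zCalc n b → Spec_zCalc n b (zCalc n b)

-- ===== LEMMAS AND PROOFS =====

-- the borrow pass of A, computed functionally from the right: (final digits, borrow out)
def fixsuf (b : Int) : List Int → List Int × Int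
  | [] => ([], 0)
  | d :: t =>
    let p := fixsuf b t
    let v := d - p.2
    if v < 0 then ((v + b) :: p.1, 1) else (v :: p.1, 0)

theorem char_eq_of_toNat (c d : Char) (h : c.toNat = d.toNat) : c = d := by
  apply Char.ext
  exact UInt32.toNat_inj.mp h
theorem digit_conv (c : Char) (h1 : '0' ≤ c) (h2 : c ≤ '9') :
    (PySem.Int.ofChars? [c]).getD 0 = (c.toNat : Int) - 48 := by
  have l1 : 48 ≤ c.toNat := UInt32.le_iff_toNat_le.mp (Char.le_def.mp h1)
  have l2 : c.toNat ≤ 57 := UInt32.le_iff_toNat_le.mp (Char.le_def.mp h2)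
  have hval : c.toNat = 48 ∨ c.toNat = 49 ∨ c.toNat = 50 ∨ c.toNat = 51 ∨
      c.toNat = 52 ∨ c.toNat = 53 ∨ c.toNat = 54 ∨ c.toNat = 55 ∨
      c.toNat = 56 ∨ c.toNat = 57 := by omega
  rcases hval with h|h|h|h|h|h|h|h|h|h
  · rw [char_eq_of_toNat c '0' (by rw [h]; rfl)]; decide
  · rw [char_eq_of_toNat c '1' (by rw [h]; rfl)]; decide
  · rw [char_eq_of_toNat c '2' (by rw [h]; rfl)]; decide
  · rw [char_eq_of_toNat c '3' (by rw [h]; rfl)]; decide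
  · rw [char_eq_of_toNat c '4' (by rw [h]; rfl)]; decide
  · rw [char_eq_of_toNat c '5' (by rw [h]; rfl)]; decide
  · rw [char_eq_of_toNat c '6' (by rw [h]; rfl)]; decide
  · rw [char_eq_of_toNat c '7' (by rw [h]; rfl)]; decide
  · rw [char_eq_of_toNat c '8' (by rw [h]; rfl)]; decide
  · rw [char_eq_of_toNat c '9' (by rw [h]; rfl)]; decide

theorem fixsuf_carry (b : Int) (t : List Int) :
    (fixsuf b t).2 = 0 ∨ (fixsuf b t).2 = 1 := by
  cases t with
  | nil => left; rfl
  | cons d t => simp only [fixsuf]; split <;> simp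
theorem fixsuf_carry_nonneg (b : Int) (t : List Int) : 0 ≤ (fixsuf b t).2 := by
  rcases fixsuf_carry b t with h | h <;> omega

theorem getD_append_len (p s : List Int) (d : Int) : (p ++ d :: s).getD p.length 0 = d := by
  induction p with
  | nil => rfl
  | cons x p ih => simpa using ih

theorem set_append_len (p s : List Int) (d v : Int) : (p ++ d :: s).set p.length v = p ++ v :: s := by
  induction p with
  | nil => rfl
  | cons x p ih => simpa using ih

theorem loopA_succ (b : Int) (k : Nat) (z : List Int) (j : Nat) :
    ((List.range (j + 1)).reverse).foldl (fun z i => zStep b k z i) z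
      = ((List.range j).reverse).foldl (fun z i => zStep b k z i) (zStep b k z j) := by
  rw [List.range_succ, List.reverse_append]; rfl

theorem fixsuf_cons (b d : Int) (t : List Int) :
    fixsuf b (d :: t) = if d - (fixsuf b t).2 < 0
      then ((d - (fixsuf b t).2 + b) :: (fixsuf b t).1, 1)
      else ((d - (fixsuf b t).2) :: (fixsuf b t).1, 0) := rfl

theorem zStep_at (b : Int) (k : Nat) (q s : List Int) (x d : Int) (hd : d < b) :
    zStep b k ((q ++ [x]) ++ d :: s) (q.length + 1)
      = if d < 0 then (q ++ [x - 1]) ++ (d + b) :: s else (q ++ [x]) ++ d :: s := by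
  have hP : (q ++ [x]).length = q.length + 1 := by simp
  have hget : ((q ++ [x]) ++ d :: s).getD (q.length + 1) 0 = d := by
    rw [← hP, getD_append_len]
  have hset1 : ((q ++ [x]) ++ d :: s).set (q.length + 1) (d + b) = (q ++ [x]) ++ (d + b) :: s := by
    rw [← hP, set_append_len]
  have hassoc : (q ++ [x]) ++ (d + b) :: s = q ++ x :: (d + b) :: s := by simp
  have hget2 : ((q ++ [x]) ++ (d + b) :: s).getD q.length 0 = x := by
    rw [hassoc, getD_append_len]
  have hset2 : ((q ++ [x]) ++ (d + b) :: s).set q.length (x - 1) = (q ++ [x - 1]) ++ (d + b) :: s := by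
    rw [hassoc, set_append_len]; simp
  by_cases hneg : d < 0
  · simp only [zStep, hget, if_pos hneg, if_neg (Nat.succ_ne_zero q.length),
      Nat.add_sub_cancel, hset1, hget2, hset2]
  · simp only [zStep, hget, if_neg hneg, if_neg (show ¬ b ≤ d by omega)]

theorem loopA_inv (b : Int) (k : Nat) (t : List Int) :
    ∀ (q : List Int) (x d : Int),
    (∀ v ∈ d :: t, v < b) →
    ((List.range (q.length + 1 + t.length + 1)).reverse).foldl (fun z i => zStep b k z i) ((q ++ [x]) ++ d :: t)
      = ((List.range (q.length + 1)).reverse).foldl (fun z i => zStep b k z i)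
          ((q ++ [x - (fixsuf b (d :: t)).2]) ++ (fixsuf b (d :: t)).1) := by
  induction t with
  | nil =>
    intro q x d hbound
    have hd : d < b := hbound d (by simp)
    rw [show q.length + 1 + List.length ([] : List Int) + 1 = (q.length + 1) + 1 by simp, loopA_succ,
        zStep_at b k q [] x d hd]
    have hfe : (fixsuf b ([] : List Int)).2 = 0 := rfl
    by_cases hneg : d < 0
    · rw [if_pos hneg, fixsuf_cons, hfe, if_pos (by omega : d - 0 < 0)]
      simp [show (fixsuf b ([] : List Int)).1 = [] from rfl]
    · rw [if_neg hneg, fixsuf_cons, hfe, if_neg (by omega : ¬ d - 0 < 0)]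
      simp [show (fixsuf b ([] : List Int)).1 = [] from rfl]
  | cons d' t' ih =>
    intro q x d hbound
    have hc0 := fixsuf_carry_nonneg b (d' :: t')
    have hd : d < b := hbound d (by simp)
    have hv : d - (fixsuf b (d' :: t')).2 < b := by omega
    have step1 := ih (q ++ [x]) d d' (fun v hv => hbound v (by simp at hv ⊢; tauto))
    rw [show q.length + 1 + (d' :: t').length + 1 = (q ++ [x]).length + 1 + t'.length + 1 by simp; omega,
        show (q ++ [x]) ++ d :: d' :: t' = ((q ++ [x]) ++ [d]) ++ d' :: t' by simp, step1,
        show (q ++ [x]).length + 1 = q.length + 1 + 1 by simp, loopA_succ,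
        show ((q ++ [x]) ++ [d - (fixsuf b (d' :: t')).2]) ++ (fixsuf b (d' :: t')).1
           = (q ++ [x]) ++ (d - (fixsuf b (d' :: t')).2) :: (fixsuf b (d' :: t')).1 by simp,
        zStep_at b k q _ x _ hv]
    by_cases hneg : d - (fixsuf b (d' :: t')).2 < 0
    · rw [if_pos hneg]
      conv_rhs => rw [fixsuf_cons, if_pos hneg]
    · rw [if_neg hneg]
      conv_rhs => rw [fixsuf_cons, if_neg hneg]
      norm_num

theorem zStep_zero (b : Int) (k : Nat) (v : Int) (s : List Int) (h0 : 0 ≤ v) (hb : v < b) :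
    zStep b k (v :: s) 0 = v :: s := by
  simp [zStep, show ¬ v < 0 by omega, show ¬ b ≤ v by omega]

theorem fixsuf_length (b : Int) (t : List Int) : (fixsuf b t).1.length = t.length := by
  induction t with
  | nil => rfl
  | cons e t iht => simp only [fixsuf]; split <;> simp [iht]

theorem fixsuf_digits (b : Int) (t : List Int) (h : ∀ x ∈ t, -b < x ∧ x < b) :
    ∀ x ∈ (fixsuf b t).1, 0 ≤ x ∧ x < b := by
  induction t with
  | nil => simp [fixsuf]
  | cons d t ih =>
    have hc := fixsuf_carry b t
    have hd := h d (by simp)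
    intro x hx
    rw [fixsuf_cons] at hx
    split at hx
    · rename_i hneg
      simp only [List.mem_cons] at hx
      rcases hx with rfl | hx
      · rcases hc with h0 | h0 <;> omega
      · exact ih (fun y hy => h y (by simp [hy])) x hx
    · rename_i hneg
      simp only [List.mem_cons] at hx
      rcases hx with rfl | hx
      · rcases hc with h0 | h0 <;> omega
      · exact ih (fun y hy => h y (by simp [hy])) x hx

theorem borrow_loop_ok (b : Int) (k : Nat) (w0 : Int) (wt : List Int)
    (hbound : ∀ x ∈ w0 :: wt, x < b)
    (hge : (fixsuf b wt).2 ≤ w0) (hw0 : w0 < b) :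
    ((List.range (w0 :: wt).length).reverse).foldl (fun z i => zStep b k z i) (w0 :: wt)
      = (fixsuf b (w0 :: wt)).1 ∧ (fixsuf b (w0 :: wt)).2 = 0 := by
  cases wt with
  | nil =>
    have h0 : (fixsuf b ([] : List Int)).2 = 0 := rfl
    rw [h0] at hge
    constructor
    · show zStep b k [w0] 0 = _
      rw [zStep_zero b k w0 [] (by omega) hw0, fixsuf_cons, h0]
      simp only [sub_zero]
      rw [if_neg (show ¬ w0 < 0 by omega)]
      simp [show (fixsuf b ([] : List Int)).1 = [] from rfl]
    · rw [fixsuf_cons, h0]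
      simp only [sub_zero]
      rw [if_neg (show ¬ w0 < 0 by omega)]
  | cons d' t' =>
    have hc0 := fixsuf_carry_nonneg b (d' :: t')
    have key := loopA_inv b k t' [] w0 d' (fun v hv => hbound v (by simp at hv ⊢; tauto))
    simp only [List.nil_append, List.singleton_append, List.length_nil, Nat.zero_add] at key
    rw [show (w0 :: d' :: t').length = 1 + t'.length + 1 by simp; omega, key]
    have hgoal : zStep b k ((w0 - (fixsuf b (d' :: t')).2) :: (fixsuf b (d' :: t')).1) 0
        = (w0 - (fixsuf b (d' :: t')).2) :: (fixsuf b (d' :: t')).1 :=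
      zStep_zero b k _ _ (by omega) (by omega)
    constructor
    · show zStep b k _ 0 = _
      rw [hgoal]
      conv_rhs => rw [fixsuf_cons, if_neg (by omega : ¬ w0 - (fixsuf b (d' :: t')).2 < 0)]
    · rw [fixsuf_cons, if_neg (by omega : ¬ w0 - (fixsuf b (d' :: t')).2 < 0)]

theorem map_range_zip (xs ys : List Int) (h : xs.length = ys.length) :
    (List.range ys.length).map (fun i => xs.getD i 0 - ys.getD i 0) = List.zipWith (· - ·) xs ys := by
  apply List.ext_getElem
  · simp [h]
  · intro i h1 h2
    simp only [List.getElem_map, List.getElem_range, List.getElem_zipWith]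
    have hi : i < ys.length := by simpa using h1
    rw [List.getD_eq_getElem xs 0 (by omega), List.getD_eq_getElem ys 0 (by omega)]

theorem fixsuf_carry_neg (b : Int) (t : List Int) (h : (fixsuf b t).2 = 1) :
    ∃ x ∈ t, x < 0 := by
  induction t with
  | nil => simp [fixsuf] at h
  | cons d t ih =>
    simp only [fixsuf] at h
    split at h
    · rename_i hv
      by_cases hd : d < 0
      · exact ⟨d, by simp, hd⟩
      · have hc : (fixsuf b t).2 = 1 := by
          rcases fixsuf_carry b t with h0 | h1
          · omega
          · exact h1
        obtain ⟨x, hx, hxn⟩ := ih hc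
        exact ⟨x, by simp [hx], hxn⟩
    · simp at h

theorem horner_shift (b : Int) (t : List Int) : ∀ (a : Int),
    t.foldl (fun a d => a * b + d) a = a * b ^ t.length + t.foldl (fun a d => a * b + d) 0 := by
  induction t with
  | nil => simp
  | cons d t ih =>
    intro a
    simp only [List.foldl_cons, List.length_cons]
    rw [ih (a * b + d), ih (0 * b + d)]
    ring

theorem horner_sub (b : Int) (xs : List Int) : ∀ (ys : List Int), xs.length = ys.length → ∀ (a a' : Int),
    xs.foldl (fun a d => a * b + d) a - ys.foldl (fun a d => a * b + d) a'
      = (List.zipWith (· - ·) xs ys).foldl (fun a d => a * b + d) (a - a') := by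
  induction xs with
  | nil =>
    intro ys h a a'
    have : ys = [] := by simpa using (List.length_eq_zero_iff.mp h.symm)
    simp [this]
  | cons x xs ih =>
    intro ys h a a'
    cases ys with
    | nil => simp at h
    | cons y ys =>
      simp only [List.zipWith_cons_cons, List.foldl_cons]
      rw [ih ys (by simpa using h) (a * b + x) (a' * b + y)]
      ring_nf


theorem horner_fixsuf (b : Int) (t : List Int) :
    t.foldl (fun a d => a * b + d) 0
      = (fixsuf b t).1.foldl (fun a d => a * b + d) 0 - (fixsuf b t).2 * b ^ t.length := by
  induction t with
  | nil => simp [fixsuf]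
  | cons d t ih =>
    simp only [fixsuf, List.length_cons]
    split
    · simp only [List.foldl_cons]
      rw [horner_shift b t (0 * b + d), horner_shift b ((fixsuf b t).1) (0 * b + (d - (fixsuf b t).2 + b)), ih]
      have hl := fixsuf_length b t
      rw [hl]; ring
    · simp only [List.foldl_cons]
      rw [horner_shift b t (0 * b + d), horner_shift b ((fixsuf b t).1) (0 * b + (d - (fixsuf b t).2)), ih]
      have hl := fixsuf_length b t
      rw [hl]; ring

theorem divmod_exact (b q r : Int) (hb : 0 < b) (h0 : 0 ≤ r) (h1 : r < b) :
    PySem.Int.divmod? (q * b + r) b = some (q, r) := by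
  have hfd : PySem.Int.floordiv (q * b + r) b = q := by
    rw [PySem.Int.floordiv_eq_iff_of_pos hb]
    constructor <;> nlinarith
  have hm := PySem.Int.floordiv_mul_add_mod (q * b + r) b
  have hmd : PySem.Int.mod (q * b + r) b = r := by rw [hfd] at hm; omega
  simp only [PySem.Int.floordiv] at hfd
  simp only [PySem.Int.mod] at hmd
  simp [PySem.Int.divmod?, hb.ne', hfd, hmd]

theorem foldl_const_iterate {α β : Type} (g : α → α) (l : List β) (st : α) :
    l.foldl (fun st _ => g st) st = g^[l.length] st := by
  induction l generalizing st with
  | nil => rfl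
  | cons x l ih => simpa using ih (g st)

theorem expand_digits (b : Int) (hb : 0 < b) (digs : List Int)
    (hd : ∀ x ∈ digs, 0 ≤ x ∧ x < b) : ∀ (acc : List Int),
    (fun (st : Int × List Int) =>
        (((PySem.Int.divmod? st.1 b).getD (0, 0)).1, st.2 ++ [((PySem.Int.divmod? st.1 b).getD (0, 0)).2]))^[digs.length]
      (digs.foldl (fun a d => a * b + d) 0, acc) = (0, acc ++ digs.reverse) := by
  induction digs using List.reverseRecOn with
  | nil => intro acc; simp
  | append_singleton init last ih =>
    intro acc
    have hlast := hd last (by simp)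
    simp only [List.length_append, List.length_singleton, Function.iterate_add_apply,
      Function.iterate_one]
    have hv : (init ++ [last]).foldl (fun a d => a * b + d) 0
        = (init.foldl (fun a d => a * b + d) 0) * b + last := by
      simp [List.foldl_append]
    rw [hv]
    simp only [divmod_exact b _ last hb hlast.1 hlast.2, Option.getD_some]
    rw [ih (fun x hx => hd x (by simp [hx])) (acc ++ [last])]
    simp

-- ===== VERDICT (by name: the statement is the Claim_ definition above) =====
theorem digit_lower (c : Char) (h : '0' ≤ c) : (48 : Int) ≤ (c.toNat : Int) := by
  have h1 := UInt32.le_iff_toNat_le.mp (Char.le_def.mp h)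
  have h2 : c.toNat = c.val.toNat := rfl
  have h3 : ('0').val.toNat = 48 := rfl
  omega

theorem zCore (b : Int) (ds : List Int)
    (hmem : ∀ v ∈ ds, 0 ≤ v ∧ v < b)
    (hpair : ds.Pairwise (· ≤ ·))
    (hne : ds ≠ []) :
    PySem.Str.join "" (List.map PySem.Int.toStr
      (List.foldl (fun z i => zStep b ds.length z i)
        (List.map (fun i => ds.reverse.getD i 0 - ds.getD i 0) (List.range ds.length))
        (List.range ds.length).reverse))
    = PySem.Str.join "" (List.map PySem.Int.toStr
        (List.foldl (fun (st : Int × List Int) (_ : Nat) =>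
            (((PySem.Int.divmod? st.1 b).getD (0, 0)).1, st.2 ++ [((PySem.Int.divmod? st.1 b).getD (0, 0)).2]))
          (ds.reverse.foldl (fun a d => a * b + d) 0 - ds.foldl (fun a d => a * b + d) 0, [])
          (List.range ds.length)).2.reverse) := by
  have hdpos : 0 < ds.length := List.length_pos_iff.mpr hne
  have hb : 0 < b := by
    obtain ⟨v, hv⟩ := List.exists_mem_of_ne_nil ds hne
    have := hmem v hv
    omega
  rw [map_range_zip ds.reverse ds (by simp)]
  set w := List.zipWith (· - ·) ds.reverse ds with hwdef
  have hwlen : w.length = ds.length := by rw [hwdef]; simp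
  have hmono : ∀ (i j : Nat) (hj : j < ds.length) (hij : i ≤ j), ds[i]'(by omega) ≤ ds[j]'hj := by
    intro i j hj hij
    rcases Nat.eq_or_lt_of_le hij with rfl | hlt
    · exact le_refl _
    · exact List.pairwise_iff_getElem.mp hpair i j (by omega) hj hlt
  have hwelem : ∀ (i : Nat) (hi : i < ds.length),
      w[i]'(by omega) = ds[ds.length - 1 - i]'(by omega) - ds[i]'hi := by
    intro i hi
    simp only [hwdef, List.getElem_zipWith, List.getElem_reverse]
  have hwbound : ∀ x ∈ w, -b < x ∧ x < b := by
    intro x hx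
    obtain ⟨i, hi, rfl⟩ := List.mem_iff_getElem.mp hx
    have hi' : i < ds.length := by omega
    rw [hwelem i hi']
    have b1 := hmem _ (List.getElem_mem (l := ds) (n := ds.length - 1 - i) (by omega))
    have b2 := hmem _ (List.getElem_mem (l := ds) (n := i) hi')
    omega
  have hwne : w ≠ [] := by
    intro hcon
    rw [hcon] at hwlen
    simp at hwlen
    omega
  obtain ⟨w0, wt, hw0⟩ := List.exists_cons_of_ne_nil hwne
  have hA0 := hmem _ (List.getElem_mem (l := ds) (n := ds.length - 1) (by omega))
  have hB0 := hmem _ (List.getElem_mem (l := ds) (n := 0) (by omega))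
  have hAB := hmono 0 (ds.length - 1) (by omega) (by omega)
  have h00 : w0 = ds[ds.length - 1]'(by omega) - ds[0]'(by omega) := by
    have h := hwelem 0 hdpos
    simp only [Nat.sub_zero] at h
    have h2 : w[0]'(by omega) = w0 := by simp only [hw0, List.getElem_cons_zero]
    exact h2.symm.trans h
  have hge : (fixsuf b wt).2 ≤ w0 := by
    rcases fixsuf_carry b wt with hcar | hcar
    · rw [hcar]; omega
    · rw [hcar]
      obtain ⟨x, hxmem, hxneg⟩ := fixsuf_carry_neg b wt hcar
      have hxw : x ∈ w := by rw [hw0]; exact List.mem_cons_of_mem _ hxmem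
      obtain ⟨i, hi, hxe⟩ := List.mem_iff_getElem.mp hxw
      have hi' : i < ds.length := by omega
      have he := hwelem i hi'
      rw [hxe] at he
      have c1 := hmono 0 (ds.length - 1 - i) (by omega) (by omega)
      have c2 := hmono i (ds.length - 1) (by omega) (by omega)
      omega
  have hw0lt : w0 < b := by omega
  have hboundlt : ∀ x ∈ w0 :: wt, x < b := by
    intro x hx
    exact (hwbound x (by rw [hw0]; exact hx)).2
  obtain ⟨hA, hcarry0⟩ := borrow_loop_ok b ds.length w0 wt hboundlt hge hw0lt
  rw [← hw0] at hA hcarry0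
  rw [hwlen] at hA
  rw [hA]
  rw [horner_sub b ds.reverse ds (by simp) 0 0]
  rw [← hwdef]
  rw [show (0 : Int) - 0 = 0 from rfl]
  rw [horner_fixsuf b w, hcarry0]
  simp only [zero_mul, sub_zero]
  rw [foldl_const_iterate]
  simp only [List.length_range]
  rw [show ds.length = (fixsuf b w).1.length from by rw [fixsuf_length, hwlen]]
  rw [expand_digits b hb (fixsuf b w).1 (fixsuf_digits b w hwbound) []]
  simp

theorem zCalc_spec : Claim_equal_zCalc := by
  intro n b _ hpre
  replace hpre : ∀ c ∈ n.toList, '0' ≤ c ∧ c ≤ '9' ∧ (c.toNat : Int) - 48 < b := by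
    simpa [Pre_zCalc, List.all_eq_true, Bool.and_eq_true, decide_eq_true_iff, and_assoc] using hpre
  unfold Spec_zCalc
  show zCalc n b = zCalc_alt n b
  simp only [zCalc, zCalc_alt]
  rw [PySem.List.slice?_none_none_neg_one]
  simp only [Option.getD_some]
  by_cases hnil : n.toList = []
  · simp [hnil]
  · have hlen : (PySem.List.sorted (n.toList.map (fun c => (PySem.Int.ofChars? [c]).getD 0)) (fun v => v) false).length = n.toList.length := by
      rw [PySem.List.length_sorted, List.length_map]
    have hmem : ∀ v ∈ PySem.List.sorted (n.toList.map (fun c => (PySem.Int.ofChars? [c]).getD 0)) (fun v => v) false, 0 ≤ v ∧ v < b := by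
      intro v hv
      rw [PySem.List.mem_sorted] at hv
      obtain ⟨c, hc, rfl⟩ := List.mem_map.mp hv
      obtain ⟨h1, h2, h3⟩ := hpre c hc
      rw [digit_conv c h1 h2]
      have := digit_lower c h1
      omega
    have hpair : (PySem.List.sorted (n.toList.map (fun c => (PySem.Int.ofChars? [c]).getD 0)) (fun v => v) false).Pairwise (· ≤ ·) := by
      have h := PySem.List.sorted_pairwise (xs := n.toList.map (fun c => (PySem.Int.ofChars? [c]).getD 0)) (key := fun v => v)
      simpa using h
    have hne : PySem.List.sorted (n.toList.map (fun c => (PySem.Int.ofChars? [c]).getD 0)) (fun v => v) false ≠ [] := by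
      intro hcon
      have := hlen
      rw [hcon] at this
      simp at this
      exact hnil (List.length_eq_zero_iff.mp this.symm)
    have hcore := zCore b _ hmem hpair hne
    rw [← hlen]
    exact hcore
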